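-- pv_equiv track=rewrite | github.com/sachin2000k/news | main.py | transform
-- ===== SOURCE A (Python) =====
-- import string
-- from collections import defaultdict
--
-- def transform(text_fields):
--     punct_stats = []
--     punctuations = list(string.punctuation)
--     for field in text_fields:
--         if field == None:
--             field = " "
--         puncts = defaultdict(int)
--         for ch in field:
--             if ch in punctuations:
--                 puncts[ch]+=1
--         punct_stats.append(puncts)
--     return punct_stats
-- ===== SOURCE B (Python) =====
-- import string
-- from collections import defaultdict
--
--
-- def _pcounts(chars, P):
--     """Punctuation counts of chars, by divide and conquer: split in half,
--     count each half recursively, merge the two dicts by adding counts."""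
--     d = defaultdict(int)
--     if len(chars) <= 1:
--         if chars and chars[0] in P:
--             d[chars[0]] = 1
--         return d
--     mid = len(chars) // 2
--     d = _pcounts(chars[:mid], P)
--     for k, v in _pcounts(chars[mid:], P).items():
--         d[k] += v
--     return d
--
--
-- def transform(text_fields):
--     P = set(string.punctuation)
--     punct_stats = []
--     for field in text_fields:
--         if field is None:
--             field = " "
--         punct_stats.append(_pcounts(list(field), P))
--     return punct_stats
-- ===== Notes on version B (the rewrite author's own statement) =====
-- stated objective: alternative
-- what changed: A counts in a single left-to-right pass incrementing a defaultdict per character; B counts by divide and conquer: it splits the character list in half, recursively counts punctuation in each half, and merges the two sub-dicts by adding counts.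
import Mathlib
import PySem

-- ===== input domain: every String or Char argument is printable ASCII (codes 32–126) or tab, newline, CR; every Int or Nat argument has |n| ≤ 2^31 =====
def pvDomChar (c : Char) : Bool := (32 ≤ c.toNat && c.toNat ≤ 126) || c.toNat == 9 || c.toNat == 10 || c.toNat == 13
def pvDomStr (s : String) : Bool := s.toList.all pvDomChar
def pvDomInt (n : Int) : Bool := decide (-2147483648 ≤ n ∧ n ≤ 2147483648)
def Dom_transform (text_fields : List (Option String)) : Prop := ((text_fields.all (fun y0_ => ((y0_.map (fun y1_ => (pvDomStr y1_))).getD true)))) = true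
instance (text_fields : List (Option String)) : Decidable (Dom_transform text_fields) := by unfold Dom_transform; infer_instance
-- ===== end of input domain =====

-- B replaces A's single incrementing pass with a divide-and-conquer count (split the field in half, count each half recursively, merge the sub-dicts by adding); same results, a different algorithm of similar cost.


-- ===== PORT A =====
-- string.punctuation, as the list of its 1-character strings (Python iterates a str as 1-char strings)
def pyPunctuation : List String := "!\"#$%&'()*+,-./:;<=>?@[\\]^_`{|}~".toList.map (fun c => String.ofList [c])

def transform (text_fields : List (Option String)) : List (List (String × Int)) :=
  text_fields.foldl (fun punct_stats field =>
    let f := field.getD " "        -- if field == None: field = " "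
    let puncts :=
      (f.toList.map (fun c => String.ofList [c])).foldl
        (fun d ch => if pyPunctuation.contains ch then d.modify ch 0 (· + 1) else d)
        PySem.Dict.empty
    punct_stats ++ [puncts.items]) []

-- ===== PORT B =====
-- _pcounts: divide and conquer; 'ch in P' is the same membership test as A's (set vs list of the same 94 strings)
def pcounts (chars : List String) : PySem.Dict String Int :=
  if _h : chars.length ≤ 1 then
    match chars with
    | [] => PySem.Dict.empty
    | c :: _ => if pyPunctuation.contains c then PySem.Dict.empty.insert c 1 else PySem.Dict.empty
  else
    let mid := chars.length / 2
    let d := pcounts (chars.take mid)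
    (pcounts (chars.drop mid)).items.foldl (fun d p => d.modify p.1 0 (· + p.2)) d
termination_by chars.length
decreasing_by
  · simp only [List.length_take]; omega
  · simp only [List.length_drop]; omega

def transform_alt (text_fields : List (Option String)) : List (List (String × Int)) :=
  text_fields.foldl (fun punct_stats field =>
    let f := field.getD " "
    punct_stats ++ [(pcounts (f.toList.map (fun c => String.ofList [c]))).items]) []

-- ===== PRECONDITION & SPEC =====
def Spec_transform (text_fields : List (Option String)) (out : List (List (String × Int))) : Prop := out = transform_alt text_fields
instance (text_fields : List (Option String)) (out : List (List (String × Int))) : Decidable (Spec_transform text_fields out) := by unfold Spec_transform; infer_instance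

-- ===== CLAIM (what is proved, stated in full; the proofs are below) =====
def Claim_equal_transform : Prop := ∀ (text_fields : List (Option String)), Dom_transform text_fields → Spec_transform text_fields (transform text_fields)

-- ===== LEMMAS AND PROOFS =====

-- s.update(l) only looks at l's first occurrences
theorem set_update_ofList (s : PySem.Set String) (l : List String) :
    PySem.Set.update s (PySem.Set.ofList l) = PySem.Set.update s l := by
  rw [PySem.Set.update_eq_append_filter, PySem.Set.update_eq_append_filter, PySem.Set.ofList_ofList]

-- a Nodup list filtered for equality with k
theorem filter_beq_of_nodup (l : List String) (k : String) (h : l.Nodup) :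
    l.filter (fun c => c == k) = if k ∈ l then [k] else [] := by
  induction l with
  | nil => simp
  | cons a t ih =>
    simp only [List.nodup_cons] at h
    by_cases hak : a = k
    · subst hak
      have : t.filter (fun c => c == a) = [] := by
        rw [List.filter_eq_nil_iff]; intro c hc
        simp only [beq_iff_eq]; intro hca; exact h.1 (hca ▸ hc)
      simp [this]
    · simp only [List.filter_cons, beq_iff_eq, hak, List.mem_cons]
      rw [ih h.2]
      simp [Ne.symm hak]

-- the merge loop's value at any key: the start value plus the summed contributions for that key
theorem getD_foldl_modify_add (pairs : List (String × Int)) (d : PySem.Dict String Int) (k : String) :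
    (pairs.foldl (fun d p => d.modify p.1 0 (· + p.2)) d).getD k 0
      = d.getD k 0 + ((pairs.filter (fun p => p.1 == k)).map (·.2)).sum := by
  induction pairs generalizing d with
  | nil => simp
  | cons p t ih =>
    simp only [List.foldl_cons, List.filter_cons]
    by_cases hpk : p.1 = k
    · rw [ih]
      simp [hpk, add_assoc]
    · rw [ih]
      have hkp : ¬ k = p.1 := fun h => hpk h.symm
      have : (p.1 == k) = false := by simp [hpk]
      simp [this, PySem.Dict.getD_modify, hkp]

-- merging Counter(y) into Counter(x) by adding is Counter(x ++ y)
theorem merge_counter (x y : List String) :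
    (PySem.Dict.counter y (κ := String)).items.foldl (fun d p => d.modify p.1 0 (· + p.2))
        (PySem.Dict.counter x)
      = PySem.Dict.counter (x ++ y) := by
  have hndL : ((PySem.Dict.counter y (κ := String)).items.foldl
      (fun d p => d.modify p.1 0 (· + p.2)) (PySem.Dict.counter x)).keys.Nodup :=
    PySem.Dict.nodup_keys_foldl_modify_key _ (fun p : String × Int => p.1) 0 (fun _ (p : String × Int) => (· + p.2)) _
      (PySem.Dict.nodup_keys_counter x)
  have hndR : (PySem.Dict.counter (x ++ y) (κ := String)).keys.Nodup :=
    PySem.Dict.nodup_keys_counter _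
  have hkeys : ((PySem.Dict.counter y (κ := String)).items.foldl
      (fun d p => d.modify p.1 0 (· + p.2)) (PySem.Dict.counter x)).keys
      = (PySem.Dict.counter (x ++ y) (κ := String)).keys := by
    rw [PySem.Dict.keys_foldl_modify_key ((PySem.Dict.counter y (κ := String)).items) (fun p : String × Int => p.1) 0
          (fun _ (p : String × Int) => (· + p.2)) (PySem.Dict.counter x)]
    have hmapfst : ((PySem.Dict.counter y (κ := String)).items.map (fun p => p.1))
        = PySem.Set.ofList y := by
      rw [PySem.Dict.items_counter]; simp [List.map_map, Function.comp_def]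
    rw [hmapfst, set_update_ofList, PySem.Dict.keys_counter, PySem.Dict.keys_counter,
        PySem.Set.ofList_append]
  have hgetD : ∀ k, ((PySem.Dict.counter y (κ := String)).items.foldl
      (fun d p => d.modify p.1 0 (· + p.2)) (PySem.Dict.counter x)).getD k 0
      = (PySem.Dict.counter (x ++ y) (κ := String)).getD k 0 := by
    intro k
    rw [getD_foldl_modify_add, PySem.Dict.getD_counter, PySem.Dict.getD_counter,
        PySem.Dict.items_counter]
    rw [List.filter_map, List.map_map]
    simp only [Function.comp_def]
    rw [filter_beq_of_nodup _ _ (PySem.Set.nodup_ofList y)]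
    by_cases hk : k ∈ y
    · simp [PySem.Set.mem_ofList, hk, List.count_append]
    · have hc0 : List.count k y = 0 := List.count_eq_zero_of_not_mem hk
      simp [PySem.Set.mem_ofList, hk, List.count_append, hc0]
  apply PySem.Dict.ext
  rw [PySem.Dict.items_eq_map_keys _ hndL 0, PySem.Dict.items_eq_map_keys _ hndR 0, hkeys]
  exact List.map_congr_left (fun k _ => by rw [hgetD k])

-- B's divide-and-conquer dict IS A's counter of the punctuation hits
theorem pcounts_eq_counter (chars : List String) :
    pcounts chars = PySem.Dict.counter (chars.filter (fun ch => pyPunctuation.contains ch)) := by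
  by_cases h : chars.length ≤ 1
  · match chars, h with
    | [], _ => simp [pcounts, PySem.Dict.counter]
    | [c], _ =>
      rw [pcounts]
      simp only [List.length_cons, List.length_nil, Nat.le_refl, dif_pos]
      by_cases hc : pyPunctuation.contains c
      · rw [if_pos hc]
        have hc' : c ∈ pyPunctuation := by simpa using hc
        have hf : [c].filter (fun ch => pyPunctuation.contains ch) = [c] := by simp [hc']
        rw [hf]
        apply PySem.Dict.ext
        simp [PySem.Dict.counter, PySem.Dict.modify, PySem.Dict.insert, PySem.Dict.empty,
              PySem.Dict.contains, PySem.Dict.getD, PySem.Dict.get?]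
      · rw [if_neg hc]
        have hc' : c ∉ pyPunctuation := by simpa using hc
        have hf : [c].filter (fun ch => pyPunctuation.contains ch) = [] := by simp [hc']
        rw [hf]
        rfl
  · have h1 : (chars.take (chars.length / 2)).length < chars.length := by
      simp only [List.length_take]; omega
    have h2 : (chars.drop (chars.length / 2)).length < chars.length := by
      simp only [List.length_drop]; omega
    rw [pcounts, dif_neg h]
    simp only [pcounts_eq_counter (chars.take (chars.length / 2)),
        pcounts_eq_counter (chars.drop (chars.length / 2))]
    rw [merge_counter, ← List.filter_append, List.take_append_drop]
termination_by chars.length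

-- per field, both dicts' items coincide
theorem transform_field_eq (field : Option String) :
    (((field.getD " ").toList.map (fun c => String.ofList [c])).foldl
        (fun d ch => if pyPunctuation.contains ch then d.modify ch 0 (· + 1) else d)
        PySem.Dict.empty).items
    = (pcounts ((field.getD " ").toList.map (fun c => String.ofList [c]))).items := by
  generalize ((field.getD " ").toList.map (fun c => String.ofList [c])) = f
  rw [PySem.List.foldl_if_eq_foldl_filter, pcounts_eq_counter, PySem.Dict.counter_eq_foldl]

-- ===== VERDICT (by name: the statement is the Claim_ definition above) =====
theorem transform_spec : Claim_equal_transform := by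
  intro tf _
  unfold Spec_transform transform transform_alt
  rw [PySem.List.foldl_append_singleton_eq_map, PySem.List.foldl_append_singleton_eq_map]
  simp only [List.nil_append]
  exact List.map_congr_left (fun field _ => transform_field_eq field)
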